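-- pv_equiv track=rewrite | github.com/LeoYANQING/AskThenRearrange | task_matter.py | match_object
-- ===== SOURCE A (Python) =====
-- from typing import List, Optional, Tuple, Type, Union
--
-- def match_object(name: str, candidates: List[str]) -> Optional[str]:
--     name = name.lower().strip()
--     for cand in candidates:
--         if cand.lower() == name:
--             return cand
--     # Partial match
--     for cand in candidates:
--         if cand.lower() in name or name in cand.lower():
--             return cand
--     return None
-- ===== SOURCE B (Python) =====
-- from typing import List, Optional
--
-- def match_object(name: str, candidates: List[str]) -> Optional[str]:
--     name = name.lower().strip()
--     partial = None
--     for cand in candidates: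
--         cl = cand.lower()
--         if cl == name:
--             return cand
--         if partial is None and (cl in name or name in cl):
--             partial = cand
--     return partial
-- ===== Notes on version B (the rewrite author's own statement) =====
-- stated objective: alternative
-- what changed: Replaced A's two sequential passes (exact scan, then partial scan) by one pass that returns immediately on an exact match and carries the first partial match as a fallback.
import Mathlib
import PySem

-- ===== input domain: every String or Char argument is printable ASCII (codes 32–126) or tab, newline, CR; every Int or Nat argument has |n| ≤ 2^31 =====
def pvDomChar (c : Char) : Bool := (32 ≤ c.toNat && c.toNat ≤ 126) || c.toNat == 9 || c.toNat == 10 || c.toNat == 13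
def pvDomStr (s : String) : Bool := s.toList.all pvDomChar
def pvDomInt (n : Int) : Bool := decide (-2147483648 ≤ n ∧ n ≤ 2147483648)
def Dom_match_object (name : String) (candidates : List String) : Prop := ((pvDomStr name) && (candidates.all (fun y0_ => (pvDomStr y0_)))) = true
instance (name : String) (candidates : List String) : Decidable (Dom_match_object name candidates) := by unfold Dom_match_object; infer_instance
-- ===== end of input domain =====

-- ===== PORT A =====
-- B collapses A's two sequential passes into one pass carrying the first partial match; return value only.
-- first loop of A: first candidate whose lower() equals the normalized name
def pvExactLoop (name : List Char) : List String → Option String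
  | [] => none
  | c :: rest =>
    if PySem.Chars.lower c.toList == name then some c else pvExactLoop name rest

-- second loop of A: first candidate that is a substring of name or contains name
def pvPartialLoop (name : List Char) : List String → Option String
  | [] => none
  | c :: rest =>
    if PySem.Chars.isIn (PySem.Chars.lower c.toList) name ||
       PySem.Chars.isIn name (PySem.Chars.lower c.toList) then some c
    else pvPartialLoop name rest

def match_object (name : String) (candidates : List String) : Option String :=
  let nm := PySem.Chars.strip (PySem.Chars.lower name.toList)
  match pvExactLoop nm candidates with
  | some c => some c
  | none => pvPartialLoop nm candidates

-- ===== PORT B =====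
-- single loop of B, carrying the current first-partial fallback
def pvAltLoop (name : List Char) (partialM : Option String) : List String → Option String
  | [] => partialM
  | c :: rest =>
    let cl := PySem.Chars.lower c.toList
    if cl == name then some c
    else
      pvAltLoop name
        (if partialM.isNone && (PySem.Chars.isIn cl name || PySem.Chars.isIn name cl)
         then some c else partialM) rest

def match_object_alt (name : String) (candidates : List String) : Option String :=
  pvAltLoop (PySem.Chars.strip (PySem.Chars.lower name.toList)) none candidates

-- ===== PRECONDITION & SPEC =====
def Spec_match_object (name : String) (candidates : List String) (out : Option String) : Prop := out = match_object_alt name candidates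
instance (name : String) (candidates : List String) (out : Option String) : Decidable (Spec_match_object name candidates out) := by unfold Spec_match_object; infer_instance

-- ===== CLAIM (what is proved, stated in full; the proofs are below) =====
def Claim_equal_match_object : Prop := ∀ (name : String) (candidates : List String), Dom_match_object name candidates → Spec_match_object name candidates (match_object name candidates)

-- ===== LEMMAS AND PROOFS =====
-- the one-pass loop equals exact-first-then-fallback: fallback is the carried partial if set, else A's partial scan
theorem pvAltLoop_eq (name : List Char) (p : Option String) (cs : List String) :
    pvAltLoop name p cs =
      match pvExactLoop name cs with
      | some c => some c
      | none => match p with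
        | some q => some q
        | none => pvPartialLoop name cs := by
  induction cs generalizing p with
  | nil => cases p <;> simp [pvAltLoop, pvExactLoop, pvPartialLoop]
  | cons c rest ih =>
    simp only [pvAltLoop, pvExactLoop, pvPartialLoop]
    by_cases hx : PySem.Chars.lower c.toList == name
    · simp [hx]
    · simp only [hx, ih]
      cases p <;>
        rcases (PySem.Chars.isIn (PySem.Chars.lower c.toList) name ||
            PySem.Chars.isIn name (PySem.Chars.lower c.toList)) with _ | _ <;> simp

-- ===== VERDICT (by name: the statement is the Claim_ definition above) =====
theorem match_object_spec : Claim_equal_match_object := by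
  intro name candidates _
  unfold Spec_match_object match_object match_object_alt
  rw [pvAltLoop_eq]
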